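-- pv_equiv track=rewrite | github.com/MayerMarvin/GFF-file-handler | gff_file_handler.py | get_3_5_UTR
-- ===== SOURCE A (Python) =====
-- def get_3_5_UTR(UTR_3, UTR_5, names_5):
--     all_UTR=[]
--     counter=0
--     for row_3 in UTR_3:
--         if row_3[0] in names_5:
--             for row_5 in UTR_5:
--                 if row_3[0] == row_5[0]:
--                     counter +=1
--                     in_both_lists=[row_3[0], row_5[1], row_5[2], row_3[1], row_3[2]]
--                     all_UTR.append(in_both_lists)
--     return all_UTR
-- ===== SOURCE B (Python) =====
-- def get_3_5_UTR(UTR_3, UTR_5, names_5):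
--     # Group UTR_5 rows once by the tuple key row_5[:1] (safe on empty rows, which
--     # can never match any row_3[0]), then emit per UTR_3 row by dict lookup.
--     groups = {}
--     for row_5 in UTR_5:
--         groups.setdefault(tuple(row_5[:1]), []).append(row_5)
--     names = set(names_5)
--     all_UTR = []
--     for row_3 in UTR_3:
--         if row_3[0] in names:
--             for row_5 in groups.get((row_3[0],), []):
--                 all_UTR.append([row_3[0], row_5[1], row_5[2], row_3[1], row_3[2]])
--     return all_UTR
-- ===== Notes on version B (the rewrite author's own statement) =====
-- stated objective: alternative
-- what changed: B groups UTR_5 by the safe tuple key row_5[:1] into a dict once and replaces A's inner scan of UTR_5 (and the list membership test on names_5) by a dict/set lookup per UTR_3 row.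
import Mathlib
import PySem

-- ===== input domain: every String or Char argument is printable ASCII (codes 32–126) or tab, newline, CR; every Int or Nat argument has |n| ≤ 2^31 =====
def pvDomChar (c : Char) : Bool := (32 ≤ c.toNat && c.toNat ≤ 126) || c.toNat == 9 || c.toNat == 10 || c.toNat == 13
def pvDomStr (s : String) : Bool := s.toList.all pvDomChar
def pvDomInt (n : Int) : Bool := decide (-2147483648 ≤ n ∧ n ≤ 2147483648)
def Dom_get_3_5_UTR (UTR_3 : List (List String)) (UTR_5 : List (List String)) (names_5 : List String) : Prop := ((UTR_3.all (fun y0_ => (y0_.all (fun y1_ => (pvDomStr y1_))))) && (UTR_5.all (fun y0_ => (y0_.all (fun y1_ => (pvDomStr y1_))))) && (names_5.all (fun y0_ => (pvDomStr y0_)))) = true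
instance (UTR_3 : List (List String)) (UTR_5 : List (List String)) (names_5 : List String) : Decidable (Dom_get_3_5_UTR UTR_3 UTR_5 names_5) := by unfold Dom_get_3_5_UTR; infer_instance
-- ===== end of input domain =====

-- B restructures the join: a dict grouping UTR_5 by the safe key row_5[:1] built once and a set of names_5 replace A's inner scan per UTR_3 row; return-value equivalence is proved on Pre_ (exactly where A returns).


-- shared helper: row[0] (xs[0] with a default; in range wherever either port evaluates it under Pre_)
def pvKey (r : List String) : String := PySem.List.pyGetD r 0 ""

-- ===== PORT A =====
-- literal transliteration of A: outer loop over UTR_3, list membership test on names_5,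
-- inner loop over UTR_5; state is (all_UTR, counter)
def get_3_5_UTR (UTR_3 : List (List String)) (UTR_5 : List (List String)) (names_5 : List String) : List (List String) :=
  (UTR_3.foldl (fun st row_3 =>
    if names_5.contains (pvKey row_3) then
      UTR_5.foldl (fun st2 row_5 =>
        if pvKey row_3 == pvKey row_5 then
          (st2.1 ++ [[pvKey row_3, PySem.List.pyGetD row_5 1 "", PySem.List.pyGetD row_5 2 "",
                      PySem.List.pyGetD row_3 1 "", PySem.List.pyGetD row_3 2 ""]], st2.2 + 1)
        else st2) st
    else st) (([], 0) : List (List String) × Int)).1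

-- ===== PORT B =====
-- B-side helper: the emitted row [row_3[0], row_5[1], row_5[2], row_3[1], row_3[2]]
def pvEmit (row_3 row_5 : List String) : List String :=
  [pvKey row_3, PySem.List.pyGetD row_5 1 "", PySem.List.pyGetD row_5 2 "",
   PySem.List.pyGetD row_3 1 "", PySem.List.pyGetD row_3 2 ""]

-- literal transliteration of B: groups = dict keyed by tuple(row_5[:1]) (setdefault+append;
-- the slice row_5[:1] is exactly List.take 1), names = set(names_5), then one pass over
-- UTR_3 looking up key (row_3[0],)
def get_3_5_UTR_alt (UTR_3 : List (List String)) (UTR_5 : List (List String)) (names_5 : List String) : List (List String) :=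
  let groups : PySem.Dict (List String) (List (List String)) :=
    UTR_5.foldl (fun d row_5 => d.insert (row_5.take 1) (d.getD (row_5.take 1) [] ++ [row_5]))
      PySem.Dict.empty
  let names : PySem.Set String := PySem.Set.ofList names_5
  UTR_3.foldl (fun all_UTR row_3 =>
    if names.contains (pvKey row_3) then
      all_UTR ++ (groups.getD [pvKey row_3] []).map (pvEmit row_3)
    else all_UTR) []

-- ===== PRECONDITION & SPEC =====
-- Pre_ holds exactly where A returns normally: it excludes only inputs on which A raises
-- IndexError (an empty UTR_3 row; an empty UTR_5 row reached by a names-matched UTR_3 row;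
-- a name-matched pair of rows shorter than 3 fields).
def Pre_get_3_5_UTR (UTR_3 : List (List String)) (UTR_5 : List (List String)) (names_5 : List String) : Prop :=
  ∀ r3 ∈ UTR_3, r3 ≠ [] ∧ (pvKey r3 ∈ names_5 →
    ∀ r5 ∈ UTR_5, r5 ≠ [] ∧ (pvKey r5 = pvKey r3 → 3 ≤ r5.length ∧ 3 ≤ r3.length))
-- e.g. Pre_ holds at UTR_3 = [["geneA", "10", "20"]], UTR_5 = [["geneA", "1", "5"]], names_5 = ["geneA"]
-- (A returns [["geneA", "1", "5", "10", "20"]] there) and fails at UTR_3 = [["geneA"]], UTR_5 = [["geneA", "1", "5"]],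
-- names_5 = ["geneA"] (A raises IndexError reading row_3[1]).
instance (UTR_3 : List (List String)) (UTR_5 : List (List String)) (names_5 : List String) : Decidable (Pre_get_3_5_UTR UTR_3 UTR_5 names_5) := by unfold Pre_get_3_5_UTR; infer_instance
def pvWitness_get_3_5_UTR : List (List String) × List (List String) × List String :=
  ([["a", "b", "c"], ["z", "1", "2"]], [["a", "x", "y"], ["q", "p", "r"]], ["a"])
def Spec_get_3_5_UTR (UTR_3 : List (List String)) (UTR_5 : List (List String)) (names_5 : List String) (out : List (List String)) : Prop := out = get_3_5_UTR_alt UTR_3 UTR_5 names_5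
instance (UTR_3 : List (List String)) (UTR_5 : List (List String)) (names_5 : List String) (out : List (List String)) : Decidable (Spec_get_3_5_UTR UTR_3 UTR_5 names_5 out) := by unfold Spec_get_3_5_UTR; infer_instance

-- ===== CLAIM (what is proved, stated in full; the proofs are below) =====
def Claim_equal_get_3_5_UTR : Prop := ∀ (UTR_3 : List (List String)) (UTR_5 : List (List String)) (names_5 : List String), Dom_get_3_5_UTR UTR_3 UTR_5 names_5 → Pre_get_3_5_UTR UTR_3 UTR_5 names_5 → Spec_get_3_5_UTR UTR_3 UTR_5 names_5 (get_3_5_UTR UTR_3 UTR_5 names_5)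

-- ===== LEMMAS AND PROOFS =====

-- B's grouping dict: the bucket of key K is exactly the sublist of UTR_5 rows with r.take 1 = K.
lemma pv_groups_getD (l : List (List String)) (d : PySem.Dict (List String) (List (List String))) (K : List String) :
    (l.foldl (fun d row_5 => d.insert (row_5.take 1) (d.getD (row_5.take 1) [] ++ [row_5])) d).getD K []
    = d.getD K [] ++ l.filter (fun r5 => r5.take 1 == K) := by
  induction l generalizing d with
  | nil => simp
  | cons r5 l ih =>
    simp only [List.foldl_cons, List.filter_cons, ih, PySem.Dict.getD_insert]
    by_cases h : r5.take 1 = K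
    · simp [h]
    · simp [h, Ne.symm h, beq_iff_eq]

-- A's inner loop: its output component is the accumulator followed by one emitted row per match.
lemma pv_innerA (l : List (List String)) (row_3 : List String) (acc : List (List String)) (c : Int) :
    l.foldl (fun st2 row_5 =>
        if pvKey row_3 == pvKey row_5 then
          (st2.1 ++ [[pvKey row_3, PySem.List.pyGetD row_5 1 "", PySem.List.pyGetD row_5 2 "",
                      PySem.List.pyGetD row_3 1 "", PySem.List.pyGetD row_3 2 ""]], st2.2 + 1)
        else st2) (acc, c)
    = (acc ++ (l.filter (fun r5 => pvKey r5 == pvKey row_3)).map (pvEmit row_3),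
       c + (l.filter (fun r5 => pvKey r5 == pvKey row_3)).length) := by
  induction l generalizing acc c with
  | nil => simp
  | cons r5 l ih =>
    simp only [List.foldl_cons, List.filter_cons]
    by_cases h : pvKey row_3 = pvKey r5
    · rw [if_pos (by simp [h]), if_pos (by simp [h.symm]), ih, List.map_cons]
      simp [pvEmit, h]
      ring
    · rw [if_neg (by simp [h]), if_neg (by simp; exact fun e => h e.symm)]
      exact ih acc c

-- when every row of l is nonempty, matching on r[:1] = [k] is matching on r[0] = k
lemma pv_filter_key (l : List (List String)) (k : String) (h5 : ∀ r ∈ l, r ≠ []) :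
    l.filter (fun r5 => r5.take 1 == [k]) = l.filter (fun r5 => pvKey r5 == k) := by
  apply List.filter_congr
  intro r hr
  cases r with
  | nil => exact absurd rfl (h5 [] hr)
  | cons a t => simp [pvKey, PySem.List.pyGetD, PySem.List.pyGet?, PySem.List.pyIdx?]

-- the set built from names_5 answers membership exactly as the list does
lemma pv_names_contains (names_5 : List String) (x : String) :
    (PySem.Set.ofList names_5).contains x = names_5.contains x := by
  rw [Bool.eq_iff_iff]
  simp [PySem.Set.mem_ofList]

-- both outer loops, run from equal accumulators, produce the same output list under Pre_
lemma pv_outer (UTR_3 UTR_5 : List (List String)) (names_5 : List String)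
    (acc : List (List String)) (c : Int)
    (hP : ∀ r3 ∈ UTR_3, pvKey r3 ∈ names_5 → ∀ r5 ∈ UTR_5, r5 ≠ []) :
    (UTR_3.foldl (fun st row_3 =>
      if names_5.contains (pvKey row_3) then
        UTR_5.foldl (fun st2 row_5 =>
          if pvKey row_3 == pvKey row_5 then
            (st2.1 ++ [[pvKey row_3, PySem.List.pyGetD row_5 1 "", PySem.List.pyGetD row_5 2 "",
                        PySem.List.pyGetD row_3 1 "", PySem.List.pyGetD row_3 2 ""]], st2.2 + 1)
          else st2) st
      else st) ((acc, c) : List (List String) × Int)).1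
    = UTR_3.foldl (fun all_UTR row_3 =>
        if (PySem.Set.ofList names_5).contains (pvKey row_3) then
          all_UTR ++ ((UTR_5.foldl
              (fun d row_5 => d.insert (row_5.take 1) (d.getD (row_5.take 1) [] ++ [row_5]))
              PySem.Dict.empty).getD [pvKey row_3] []).map (pvEmit row_3)
        else all_UTR) acc := by
  induction UTR_3 generalizing acc c with
  | nil => rfl
  | cons r3 rest ih =>
    simp only [List.foldl_cons]
    have hm := pv_names_contains names_5 (pvKey r3)
    by_cases h : names_5.contains (pvKey r3) = true
    · rw [if_pos h, if_pos (hm.trans h), pv_innerA, pv_groups_getD,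
          pv_filter_key UTR_5 (pvKey r3) (hP r3 (by simp) (by simpa using h))]
      simp only [PySem.Dict.getD_empty, List.nil_append]
      exact ih _ _ (fun r3' h3 => hP r3' (List.mem_cons_of_mem _ h3))
    · rw [if_neg h, if_neg (fun e => h ((hm.symm).trans e))]
      exact ih acc c (fun r3' h3 => hP r3' (List.mem_cons_of_mem _ h3))

-- ===== VERDICT (by name: the statement is the Claim_ definition above) =====
theorem get_3_5_UTR_spec : Claim_equal_get_3_5_UTR := by
  intro UTR_3 UTR_5 names_5 _ hPre
  unfold Spec_get_3_5_UTR get_3_5_UTR get_3_5_UTR_alt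
  exact pv_outer UTR_3 UTR_5 names_5 [] 0
    (fun r3 h3 hn r5 h5 => ((hPre r3 h3).2 hn r5 h5).1)
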